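-- pv_equiv track=rewrite | github.com/JBarti/advent-of-code-2023 | day-1/main.py | check_digit
-- ===== SOURCE A (Python) =====
-- spelled_digits = {
--     "one": "1",
--     "two": "2",
--     "three": "3",
--     "four": "4",
--     "five": "5",
--     "six": "6",
--     "seven": "7",
--     "eight": "8",
--     "nine": "9",
-- }
--
-- def check_digit(substr: str, reversed=False):
--     if substr[0].isdigit():
--         return substr[0]
--
--     for spelling, digit in spelled_digits.items():
--         spelling = spelling if not reversed else spelling[::-1]
--         if substr.startswith(spelling):
--             return digit
--     return None
-- ===== SOURCE B (Python) =====
-- # Table-driven rewrite: look up fixed-length prefixes in per-length dicts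
-- # instead of scanning all spellings with startswith.
--
-- _by_len = {
--     3: {"one": "1", "two": "2", "six": "6"},
--     4: {"four": "4", "five": "5", "nine": "9"},
--     5: {"three": "3", "seven": "7", "eight": "8"},
-- }
--
-- _by_len_rev = {
--     3: {"eno": "1", "owt": "2", "xis": "6"},
--     4: {"ruof": "4", "evif": "5", "enin": "9"},
--     5: {"eerht": "3", "neves": "7", "thgie": "8"},
-- }
--
-- def check_digit(substr: str, reversed=False):
--     if substr[0].isdigit():
--         return substr[0]
--
--     tables = _by_len_rev if reversed else _by_len
--     for n, table in tables.items():
--         digit = table.get(substr[:n])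
--         if digit is not None:
--             return digit
--     return None
-- ===== Notes on version B (the rewrite author's own statement) =====
-- stated objective: alternative
-- what changed: Replaces A's startswith scan over all nine spellings with lookups of the fixed-length prefixes substr[:3], substr[:4], substr[:5] in per-length word->digit tables.
import Mathlib
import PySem

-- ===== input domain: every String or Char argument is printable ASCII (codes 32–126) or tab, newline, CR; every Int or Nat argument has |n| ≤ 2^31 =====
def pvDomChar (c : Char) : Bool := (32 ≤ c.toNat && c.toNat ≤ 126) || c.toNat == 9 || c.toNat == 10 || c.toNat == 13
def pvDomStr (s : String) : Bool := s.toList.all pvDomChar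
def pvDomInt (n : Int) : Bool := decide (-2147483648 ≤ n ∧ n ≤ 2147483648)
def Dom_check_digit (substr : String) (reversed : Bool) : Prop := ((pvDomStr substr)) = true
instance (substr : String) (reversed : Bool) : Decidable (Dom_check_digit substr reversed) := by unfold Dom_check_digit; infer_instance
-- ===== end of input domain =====

-- B replaces the startswith scan over all spellings by per-length prefix-table lookups (objective: alternative/idiomatic).

-- ===== PORT A =====
def spelledDigits : List (String × String) :=
  [("one","1"), ("two","2"), ("three","3"), ("four","4"), ("five","5"),
   ("six","6"), ("seven","7"), ("eight","8"), ("nine","9")]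

-- the for-loop over spelled_digits.items()
def checkLoopA (substr : String) (reversed : Bool) : List (String × String) → Option String
  | [] => none
  | (spelling, digit) :: rest =>
    -- spelling[::-1] never raises (step -1 ≠ 0), so getD's default is never used
    let spelling := if !reversed then spelling else (PySem.Str.slice? spelling none none (-1)).getD spelling
    if PySem.Str.startswith substr spelling then some digit
    else checkLoopA substr reversed rest

def check_digit (substr : String) (reversed : Bool) : Option String :=
  match PySem.Str.pyGet? substr 0 with
  | none => none   -- substr[0] raises IndexError: excluded by Pre_
  | some c =>
    if PySem.Str.strIsdigit (String.ofList [c]) then some (String.ofList [c])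
    else checkLoopA substr reversed spelledDigits

-- ===== PORT B =====
def byLen : List (Int × PySem.Dict String String) :=
  [(3, PySem.Dict.ofList [("one","1"), ("two","2"), ("six","6")]),
   (4, PySem.Dict.ofList [("four","4"), ("five","5"), ("nine","9")]),
   (5, PySem.Dict.ofList [("three","3"), ("seven","7"), ("eight","8")])]

def byLenRev : List (Int × PySem.Dict String String) :=
  [(3, PySem.Dict.ofList [("eno","1"), ("owt","2"), ("xis","6")]),
   (4, PySem.Dict.ofList [("ruof","4"), ("evif","5"), ("enin","9")]),
   (5, PySem.Dict.ofList [("eerht","3"), ("neves","7"), ("thgie","8")])]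

-- the for-loop over tables.items()
def checkLoopB (substr : String) : List (Int × PySem.Dict String String) → Option String
  | [] => none
  | (n, table) :: rest =>
    match PySem.Dict.get? table (PySem.Str.slice substr none (some n)) with
    | some digit => some digit
    | none => checkLoopB substr rest

def check_digit_alt (substr : String) (reversed : Bool) : Option String :=
  match PySem.Str.pyGet? substr 0 with
  | none => none   -- substr[0] raises IndexError: excluded by Pre_
  | some c =>
    if PySem.Str.strIsdigit (String.ofList [c]) then some (String.ofList [c])
    else checkLoopB substr (if reversed then byLenRev else byLen)

-- ===== PRECONDITION & SPEC =====
-- Pre_ excludes only the empty string, on which Python's substr[0] raises IndexError (in both A and B).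
def Pre_check_digit (substr : String) (reversed : Bool) : Prop := substr ≠ ""
instance (substr : String) (reversed : Bool) : Decidable (Pre_check_digit substr reversed) := by unfold Pre_check_digit; infer_instance
def pvWitness_check_digit : String × Bool := ("two", false)

def Spec_check_digit (substr : String) (reversed : Bool) (out : Option String) : Prop := out = check_digit_alt substr reversed
instance (substr : String) (reversed : Bool) (out : Option String) : Decidable (Spec_check_digit substr reversed out) := by unfold Spec_check_digit; infer_instance

-- ===== CLAIM (what is proved, stated in full; the proofs are below) =====
def Claim_equal_check_digit : Prop := ∀ (substr : String) (reversed : Bool), Dom_check_digit substr reversed → Pre_check_digit substr reversed → Spec_check_digit substr reversed (check_digit substr reversed)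

-- ===== LEMMAS AND PROOFS =====

-- canonical form of both loops: first word that is a prefix of l
def wordChain (l : List Char) : List (List Char × String) → Option String
  | [] => none
  | (w, d) :: r => if w <+: l then some d else wordChain l r

def AFwd : List (List Char × String) :=
  [("one".toList,"1"), ("two".toList,"2"), ("three".toList,"3"), ("four".toList,"4"),
   ("five".toList,"5"), ("six".toList,"6"), ("seven".toList,"7"), ("eight".toList,"8"), ("nine".toList,"9")]
def ARev : List (List Char × String) :=
  [("eno".toList,"1"), ("owt".toList,"2"), ("eerht".toList,"3"), ("ruof".toList,"4"),
   ("evif".toList,"5"), ("xis".toList,"6"), ("neves".toList,"7"), ("thgie".toList,"8"), ("enin".toList,"9")]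
def BFwd : List (List Char × String) :=
  [("one".toList,"1"), ("two".toList,"2"), ("six".toList,"6"), ("four".toList,"4"),
   ("five".toList,"5"), ("nine".toList,"9"), ("three".toList,"3"), ("seven".toList,"7"), ("eight".toList,"8")]
def BRev : List (List Char × String) :=
  [("eno".toList,"1"), ("owt".toList,"2"), ("xis".toList,"6"), ("ruof".toList,"4"),
   ("evif".toList,"5"), ("enin".toList,"9"), ("eerht".toList,"3"), ("neves".toList,"7"), ("thgie".toList,"8")]

-- no word is a prefix of another word
abbrev NonPref (p q : List Char × String) : Prop := ¬ p.1 <+: q.1 ∧ ¬ q.1 <+: p.1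

lemma excl_of_nonPref (l : List Char) (p q : List Char × String) (h : NonPref p q) :
    ¬ (p.1 <+: l ∧ q.1 <+: l) := by
  rintro ⟨h1, h2⟩
  rcases List.prefix_or_prefix_of_prefix h1 h2 with hp | hp
  · exact h.1 hp
  · exact h.2 hp

lemma wordChain_perm (l : List Char) {ws ws' : List (List Char × String)}
    (h : ws.Perm ws') (hx : ws.Pairwise (fun p q => ¬ (p.1 <+: l ∧ q.1 <+: l))) :
    wordChain l ws = wordChain l ws' := by
  induction h with
  | nil => rfl
  | cons x h ih =>
    obtain ⟨w, d⟩ := x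
    simp only [wordChain]
    rw [ih hx.tail]
  | swap x y r =>
    obtain ⟨w1, d1⟩ := x
    obtain ⟨w2, d2⟩ := y
    have hxy : ¬ ((w2, d2).1 <+: l ∧ (w1, d1).1 <+: l) := by
      have := (List.pairwise_cons.mp hx).1 (w1, d1) (by simp)
      tauto
    simp only [wordChain]
    by_cases h1 : w1 <+: l <;> by_cases h2 : w2 <+: l <;>
      simp [h1, h2] at hxy ⊢
  | trans h1 h2 ih1 ih2 =>
    rw [ih1 hx, ih2 ((h1.pairwise_iff (fun h => by tauto)).mp hx)]

lemma pairwise_excl (l : List Char) (ws : List (List Char × String))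
    (h : ws.Pairwise NonPref) : ws.Pairwise (fun p q => ¬ (p.1 <+: l ∧ q.1 <+: l)) :=
  h.imp (fun hpq => excl_of_nonPref l _ _ hpq)

lemma loopA_false (substr : String) : checkLoopA substr false spelledDigits = wordChain substr.toList AFwd := by
  simp [checkLoopA, spelledDigits, wordChain, AFwd, PySem.Chars.startswith_iff]

lemma loopA_true (substr : String) : checkLoopA substr true spelledDigits = wordChain substr.toList ARev := by
  simp only [checkLoopA, spelledDigits,
    show (PySem.Str.slice? "one" none none (-1)).getD "one" = "eno" from rfl,
    show (PySem.Str.slice? "two" none none (-1)).getD "two" = "owt" from rfl,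
    show (PySem.Str.slice? "three" none none (-1)).getD "three" = "eerht" from rfl,
    show (PySem.Str.slice? "four" none none (-1)).getD "four" = "ruof" from rfl,
    show (PySem.Str.slice? "five" none none (-1)).getD "five" = "evif" from rfl,
    show (PySem.Str.slice? "six" none none (-1)).getD "six" = "xis" from rfl,
    show (PySem.Str.slice? "seven" none none (-1)).getD "seven" = "neves" from rfl,
    show (PySem.Str.slice? "eight" none none (-1)).getD "eight" = "thgie" from rfl,
    show (PySem.Str.slice? "nine" none none (-1)).getD "nine" = "enin" from rfl]
  simp [wordChain, ARev, PySem.Chars.startswith_iff]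

lemma checkLoopB_cons (substr : String) (n : Int) (table : PySem.Dict String String)
    (rest : List (Int × PySem.Dict String String)) :
    checkLoopB substr ((n, table) :: rest) =
      (PySem.Dict.get? table (PySem.Str.slice substr none (some n))).or (checkLoopB substr rest) := by
  cases h : PySem.Dict.get? table (PySem.Str.slice substr none (some n)) <;>
    simp [checkLoopB, h, Option.or]

lemma key_pref (w : String) (l : List Char) (n : Nat) (hn : w.toList.length = n) :
    w = String.ofList (l.take n) ↔ w.toList <+: l := by
  subst hn
  rw [List.prefix_iff_eq_take]
  constructor
  · intro h; rw [h]; simp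
  · intro h; have h2 := congrArg String.ofList h; simpa using h2

lemma str_slice_take (substr : String) (n : Nat) :
    PySem.Str.slice substr none (some (n : Int)) = String.ofList (substr.toList.take n) := by
  simp [PySem.Str.slice]

set_option maxRecDepth 4096 in
lemma loopB_fwd (substr : String) : checkLoopB substr byLen = wordChain substr.toList BFwd := by
  simp only [byLen, checkLoopB_cons, checkLoopB,
    show ((3:Int)) = ((3:Nat):Int) from rfl, show ((4:Int)) = ((4:Nat):Int) from rfl,
    show ((5:Int)) = ((5:Nat):Int) from rfl, str_slice_take,
    show PySem.Dict.ofList [("one","1"), ("two","2"), ("six","6")]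
       = PySem.Dict.mk [("one","1"), ("two","2"), ("six","6")] from rfl,
    show PySem.Dict.ofList [("four","4"), ("five","5"), ("nine","9")]
       = PySem.Dict.mk [("four","4"), ("five","5"), ("nine","9")] from rfl,
    show PySem.Dict.ofList [("three","3"), ("seven","7"), ("eight","8")]
       = PySem.Dict.mk [("three","3"), ("seven","7"), ("eight","8")] from rfl,
    PySem.Dict.get?_mk_cons,
    show ∀ q : String, (PySem.Dict.mk ([] : List (String × String))).get? q = none from fun _ => rfl]
  simp only [wordChain, BFwd]
  simp [key_pref, Option.or]
  split_ifs <;> rfl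

set_option maxRecDepth 4096 in
lemma loopB_rev (substr : String) : checkLoopB substr byLenRev = wordChain substr.toList BRev := by
  simp only [byLenRev, checkLoopB_cons, checkLoopB,
    show ((3:Int)) = ((3:Nat):Int) from rfl, show ((4:Int)) = ((4:Nat):Int) from rfl,
    show ((5:Int)) = ((5:Nat):Int) from rfl, str_slice_take,
    show PySem.Dict.ofList [("eno","1"), ("owt","2"), ("xis","6")]
       = PySem.Dict.mk [("eno","1"), ("owt","2"), ("xis","6")] from rfl,
    show PySem.Dict.ofList [("ruof","4"), ("evif","5"), ("enin","9")]
       = PySem.Dict.mk [("ruof","4"), ("evif","5"), ("enin","9")] from rfl,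
    show PySem.Dict.ofList [("eerht","3"), ("neves","7"), ("thgie","8")]
       = PySem.Dict.mk [("eerht","3"), ("neves","7"), ("thgie","8")] from rfl,
    PySem.Dict.get?_mk_cons,
    show ∀ q : String, (PySem.Dict.mk ([] : List (String × String))).get? q = none from fun _ => rfl]
  simp only [wordChain, BRev]
  simp [key_pref, Option.or]
  split_ifs <;> rfl

lemma chains_fwd (l : List Char) : wordChain l AFwd = wordChain l BFwd :=
  wordChain_perm l (by decide) (pairwise_excl l AFwd (by decide))

lemma chains_rev (l : List Char) : wordChain l ARev = wordChain l BRev :=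
  wordChain_perm l (by decide) (pairwise_excl l ARev (by decide))

-- ===== VERDICT (by name: the statement is the Claim_ definition above) =====
theorem check_digit_spec : Claim_equal_check_digit := by
  intro substr reversed _ _
  unfold Spec_check_digit check_digit check_digit_alt
  cases h : PySem.Str.pyGet? substr 0 with
  | none => rfl
  | some c =>
    simp only []
    split
    · rfl
    · cases reversed
      · simp only [Bool.false_eq_true, if_false]
        rw [loopA_false, loopB_fwd, chains_fwd]
      · simp only [if_true]
        rw [loopA_true, loopB_rev, chains_rev]
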